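-- pv_equiv track=rewrite | github.com/apache/superset | superset/mcp_service/chart/tool/get_chart_preview.py | _looks_like_date
-- ===== SOURCE A (Python) =====
-- def _looks_like_date(value: str) -> bool:
--     """Quick heuristic to detect date-like strings."""
--     if not isinstance(value, str):
--         return False
--
--     # Common date patterns
--     date_indicators = [
--         "-",
--         "/",
--         "T",
--         ":",
--         "jan",
--         "feb",
--         "mar",
--         "apr",
--         "may",
--         "jun",
--         "jul",
--         "aug",
--         "sep",
--         "oct",
--         "nov",
--         "dec",
--         "monday",
--         "tuesday",
--         "wednesday",
--         "thursday",
--         "friday",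
--         "saturday",
--         "sunday",
--     ]
--
--     value_lower = value.lower()
--     return any(indicator in value_lower for indicator in date_indicators)
-- ===== SOURCE B (Python) =====
-- # Same heuristic as A, but as a single left-to-right scan over the lowered string:
-- # at each position test whether any effective token starts there.  The dead "T"
-- # indicator is omitted (a lowercased string never contains an uppercase "T").
-- _DATE_TOKENS = (
--     "-", "/", ":",
--     "jan", "feb", "mar", "apr", "may", "jun",
--     "jul", "aug", "sep", "oct", "nov", "dec",
--     "monday", "tuesday", "wednesday", "thursday", "friday", "saturday", "sunday",
-- )
--
--
-- def _looks_like_date(value: str) -> bool: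
--     """Quick heuristic to detect date-like strings."""
--     if not isinstance(value, str):
--         return False
--
--     value_lower = value.lower()
--     return any(
--         value_lower.startswith(token, i)
--         for i in range(len(value_lower))
--         for token in _DATE_TOKENS
--     )
-- ===== Notes on version B (the rewrite author's own statement) =====
-- stated objective: alternative
-- what changed: Replaces A's token-major pass (one full substring scan of the string per indicator) by a single position-major scan that tests at each position whether any effective token starts there, dropping the dead 'T' indicator which can never match a lowercased string.
import Mathlib
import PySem

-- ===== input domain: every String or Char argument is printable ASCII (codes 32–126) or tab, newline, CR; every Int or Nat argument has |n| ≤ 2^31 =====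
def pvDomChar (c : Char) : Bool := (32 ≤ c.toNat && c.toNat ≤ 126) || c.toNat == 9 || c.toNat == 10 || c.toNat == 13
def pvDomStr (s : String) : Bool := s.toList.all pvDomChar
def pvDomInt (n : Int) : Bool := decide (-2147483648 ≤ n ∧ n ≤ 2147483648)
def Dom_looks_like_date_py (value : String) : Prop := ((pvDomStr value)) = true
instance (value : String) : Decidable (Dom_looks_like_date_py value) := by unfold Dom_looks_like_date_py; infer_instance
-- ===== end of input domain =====

-- B replaces A's token-major pass (one substring scan per indicator) by a single
-- position-major scan testing all effective tokens at each position ('T' dropped as dead).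

-- ===== PORT A =====
def pvIndicators : List String :=
  ["-", "/", "T", ":",
   "jan", "feb", "mar", "apr", "may", "jun",
   "jul", "aug", "sep", "oct", "nov", "dec",
   "monday", "tuesday", "wednesday", "thursday", "friday", "saturday", "sunday"]

def looks_like_date_py (value : String) : Bool :=
  let value_lower := PySem.Str.lower value
  pvIndicators.any (fun indicator => PySem.Str.isIn indicator value_lower)

-- ===== PORT B =====
def pvDateTokens : List (List Char) :=
  [['-'], ['/'], [':'],
   ['j','a','n'], ['f','e','b'], ['m','a','r'], ['a','p','r'], ['m','a','y'], ['j','u','n'],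
   ['j','u','l'], ['a','u','g'], ['s','e','p'], ['o','c','t'], ['n','o','v'], ['d','e','c'],
   ['m','o','n','d','a','y'], ['t','u','e','s','d','a','y'], ['w','e','d','n','e','s','d','a','y'],
   ['t','h','u','r','s','d','a','y'], ['f','r','i','d','a','y'], ['s','a','t','u','r','d','a','y'],
   ['s','u','n','d','a','y']]

-- the position-major scan: at each position (i.e. on each suffix) test every token
def pvScan : List Char → Bool
  | [] => false
  | c :: rest =>
      pvDateTokens.any (fun t => PySem.Chars.startswith (c :: rest) t) || pvScan rest

def looks_like_date_py_alt (value : String) : Bool :=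
  pvScan (PySem.Chars.lower value.toList)

-- ===== PRECONDITION & SPEC =====
def Spec_looks_like_date_py (value : String) (out : Bool) : Prop := out = looks_like_date_py_alt value
instance (value : String) (out : Bool) : Decidable (Spec_looks_like_date_py value out) := by unfold Spec_looks_like_date_py; infer_instance

-- ===== CLAIM (what is proved, stated in full; the proofs are below) =====
def Claim_equal_looks_like_date_py : Prop := ∀ (value : String), Dom_looks_like_date_py value → Spec_looks_like_date_py value (looks_like_date_py value)

-- ===== LEMMAS AND PROOFS =====

-- Python's str.lower never produces an uppercase letter, in particular never 'T'
theorem pv_lowerChar_ne_T (c : Char) : PySem.Chars.lowerChar c ≠ 'T' := by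
  unfold PySem.Chars.lowerChar PySem.Chars.isupper
  split
  · rename_i h
    simp only [Bool.and_eq_true, decide_eq_true_eq] at h
    have h65 : 65 ≤ c.toNat := Nat.succ_le_of_lt h.1
    intro hEq
    have h84 : (Char.ofNat (c.toNat + 32)).toNat = 84 := by rw [hEq]; rfl
    rw [Char.toNat_ofNat] at h84
    split at h84 <;> omega
  · rename_i h
    intro hEq; subst hEq; exact h (by decide)

theorem pv_not_T_infix (l : List Char) : ¬ (['T'] <:+: PySem.Chars.lower l) := by
  intro h
  have hm : 'T' ∈ PySem.Chars.lower l := List.singleton_sublist.mp h.sublist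
  simp only [PySem.Chars.lower, List.mem_map] at hm
  obtain ⟨c, _, hc⟩ := hm
  exact pv_lowerChar_ne_T c hc

-- the scan finds a token iff some token is an infix
theorem pvScan_iff (l : List Char) :
    pvScan l = true ↔ ∃ t ∈ pvDateTokens, t <:+: l := by
  induction l with
  | nil =>
      simp only [pvScan, Bool.false_eq_true, false_iff]
      rintro ⟨t, ht, hinf⟩
      rw [List.infix_nil] at hinf
      subst hinf
      revert ht; decide
  | cons c rest ih =>
      simp only [pvScan, Bool.or_eq_true, List.any_eq_true, ih]
      constructor
      · rintro (⟨t, ht, hs⟩ | ⟨t, ht, hi⟩)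
        · exact ⟨t, ht, ((PySem.Chars.startswith_iff _ _).mp hs).isInfix⟩
        · exact ⟨t, ht, hi.trans (List.suffix_cons c rest).isInfix⟩
      · rintro ⟨t, ht, hi⟩
        rcases List.infix_cons_iff.mp hi with hp | hi'
        · exact Or.inl ⟨t, ht, (PySem.Chars.startswith_iff _ _).mpr hp⟩
        · exact Or.inr ⟨t, ht, hi'⟩

-- A finds an indicator iff some effective token is an infix ('T' can never be one)
theorem pvA_iff (value : String) :
    looks_like_date_py value = true ↔
      ∃ t ∈ pvDateTokens, t <:+: PySem.Chars.lower value.toList := by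
  unfold looks_like_date_py
  simp only [List.any_eq_true, PySem.Str.isIn_iff_infix, PySem.Str.toList_lower]
  constructor
  · rintro ⟨ind, hmem, hinf⟩
    fin_cases hmem <;>
      first
        | exact absurd hinf (pv_not_T_infix _)
        | exact ⟨_, by decide, hinf⟩
  · rintro ⟨t, hmem, hinf⟩
    fin_cases hmem
    · exact ⟨"-", by decide, hinf⟩
    · exact ⟨"/", by decide, hinf⟩
    · exact ⟨":", by decide, hinf⟩
    · exact ⟨"jan", by decide, hinf⟩
    · exact ⟨"feb", by decide, hinf⟩
    · exact ⟨"mar", by decide, hinf⟩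
    · exact ⟨"apr", by decide, hinf⟩
    · exact ⟨"may", by decide, hinf⟩
    · exact ⟨"jun", by decide, hinf⟩
    · exact ⟨"jul", by decide, hinf⟩
    · exact ⟨"aug", by decide, hinf⟩
    · exact ⟨"sep", by decide, hinf⟩
    · exact ⟨"oct", by decide, hinf⟩
    · exact ⟨"nov", by decide, hinf⟩
    · exact ⟨"dec", by decide, hinf⟩
    · exact ⟨"monday", by decide, hinf⟩
    · exact ⟨"tuesday", by decide, hinf⟩
    · exact ⟨"wednesday", by decide, hinf⟩
    · exact ⟨"thursday", by decide, hinf⟩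
    · exact ⟨"friday", by decide, hinf⟩
    · exact ⟨"saturday", by decide, hinf⟩
    · exact ⟨"sunday", by decide, hinf⟩

-- ===== VERDICT (by name: the statement is the Claim_ definition above) =====
theorem looks_like_date_py_spec : Claim_equal_looks_like_date_py := by
  intro value _hdom
  unfold Spec_looks_like_date_py
  have hiff : looks_like_date_py value = true ↔ looks_like_date_py_alt value = true := by
    unfold looks_like_date_py_alt
    exact (pvA_iff value).trans (pvScan_iff _).symm
  cases hA : looks_like_date_py value <;> cases hB : looks_like_date_py_alt value <;>
    simp_all
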